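-- pv_equiv track=rewrite | github.com/tpcourtneywm/williamandmarydocumentation | Algorithms and Artificial Intelligence/Binpackingdev-1.py | fill_the_sleigh
-- ===== SOURCE A (Python) =====
-- def fill_the_sleigh(toys, capacity):
--     santas_list = []
--     vol = 0 #packedVolume
--     while(len(toys) > 0):
--         (idNum,volume) = toys[0]
--         if vol + volume <= capacity:
--             vol += volume
--             santas_list.append(idNum)
--             del toys[0]
--         else:
--             break
--     while(len(toys) > 0):
--         (idNum, volume) = toys[-1]
--         if vol + volume <= capacity:
--             vol += volume
--             santas_list.append(idNum)
--             del toys[-1]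
--         else:
--              break
--     return (vol, santas_list)
-- ===== SOURCE B (Python) =====
-- def fill_the_sleigh(toys, capacity):
--     # One forward pass then one reversed pass with indices; no per-item del (those
--     # shift the whole list). Mutates toys via one final slice assignment, leaving
--     # the same leftover toys as A. Return-value equivalence is what is proved.
--     vol = 0
--     santas_list = []
--     i = 0
--     for idNum, volume in toys:
--         if vol + volume > capacity:
--             break
--         vol += volume
--         santas_list.append(idNum)
--         i += 1
--     rest = toys[i:]
--     k = 0
--     for idNum, volume in reversed(rest):
--         if vol + volume > capacity:
--             break
--         vol += volume
--         santas_list.append(idNum)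
--         k += 1
--     toys[:] = rest[:len(rest) - k]
--     return (vol, santas_list)
-- ===== Notes on version B (the rewrite author's own statement) =====
-- stated objective: faster
-- what changed: Replaces A's repeated del toys[0]/del toys[-1] (each an O(n) list shift) with a two-pointer index scan and one final slice assignment, so the whole packing is a single O(n) pass.
import Mathlib
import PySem

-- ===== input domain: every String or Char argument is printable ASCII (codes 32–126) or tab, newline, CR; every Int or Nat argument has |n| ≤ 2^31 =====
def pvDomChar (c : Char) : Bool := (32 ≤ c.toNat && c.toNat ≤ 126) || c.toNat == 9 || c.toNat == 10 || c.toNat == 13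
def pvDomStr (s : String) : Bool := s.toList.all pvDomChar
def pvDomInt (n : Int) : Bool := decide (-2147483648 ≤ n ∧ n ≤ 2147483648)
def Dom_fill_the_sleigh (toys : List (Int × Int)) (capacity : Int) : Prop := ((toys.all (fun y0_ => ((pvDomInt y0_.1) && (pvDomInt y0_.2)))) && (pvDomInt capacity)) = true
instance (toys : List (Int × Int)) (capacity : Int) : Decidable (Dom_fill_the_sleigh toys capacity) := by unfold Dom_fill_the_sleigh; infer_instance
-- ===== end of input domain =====

-- B replaces A's repeated del toys[0]/del toys[-1] with a single forward pass and a single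
-- reversed pass (O(n) instead of O(n^2)); equivalence proved is about the RETURN value
-- (Source B performs the same net mutation of toys via one slice assignment).

-- ===== PORT A =====
-- A's first while loop: takes toys[0] while it fits (del toys[0]); returns (vol, santas_list, remaining toys)
def aFront (capacity : Int) : List (Int × Int) → Int → List Int → Int × List Int × List (Int × Int)
  | [], vol, acc => (vol, acc, [])
  | (idNum, volume) :: rest, vol, acc =>
      if vol + volume ≤ capacity then
        aFront capacity rest (vol + volume) (acc ++ [idNum])
      else
        (vol, acc, (idNum, volume) :: rest)

-- A's second while loop: takes toys[-1] while it fits (del toys[-1])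
def aBack (capacity : Int) (toys : List (Int × Int)) (vol : Int) (acc : List Int) : Int × List Int :=
  if hne : toys = [] then (vol, acc)
  else
    let p := toys.getLast hne   -- (idNum, volume) = toys[-1]
    if vol + p.2 ≤ capacity then
      aBack capacity toys.dropLast (vol + p.2) (acc ++ [p.1])
    else
      (vol, acc)
termination_by toys.length
decreasing_by
  have := List.length_pos_iff.mpr hne
  simp [List.length_dropLast]; omega

def fill_the_sleigh (toys : List (Int × Int)) (capacity : Int) : Int × List Int :=
  match aFront capacity toys 0 [] with
  | (vol, santas_list, rem) => aBack capacity rem vol santas_list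

-- ===== PORT B =====
-- Source B's first for loop over toys (break when it no longer fits); returns (vol, ids, rest)
def bFront (capacity : Int) : List (Int × Int) → Int → List Int → Int × List Int × List (Int × Int)
  | [], vol, acc => (vol, acc, [])
  | (idNum, volume) :: rest, vol, acc =>
      if vol + volume > capacity then
        (vol, acc, (idNum, volume) :: rest)
      else
        bFront capacity rest (vol + volume) (acc ++ [idNum])

-- Source B's second for loop over reversed(rest) (break when it no longer fits)
def bBack (capacity : Int) : List (Int × Int) → Int → List Int → Int × List Int
  | [], vol, acc => (vol, acc)
  | (idNum, volume) :: rest, vol, acc =>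
      if vol + volume > capacity then
        (vol, acc)
      else
        bBack capacity rest (vol + volume) (acc ++ [idNum])

def fill_the_sleigh_alt (toys : List (Int × Int)) (capacity : Int) : Int × List Int :=
  match bFront capacity toys 0 [] with
  | (vol, santas_list, rest) => bBack capacity rest.reverse vol santas_list

-- ===== PRECONDITION & SPEC =====
def Spec_fill_the_sleigh (toys : List (Int × Int)) (capacity : Int) (out : Int × List Int) : Prop := out = fill_the_sleigh_alt toys capacity
instance (toys : List (Int × Int)) (capacity : Int) (out : Int × List Int) : Decidable (Spec_fill_the_sleigh toys capacity out) := by unfold Spec_fill_the_sleigh; infer_instance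

-- ===== CLAIM (what is proved, stated in full; the proofs are below) =====
def Claim_equal_fill_the_sleigh : Prop := ∀ (toys : List (Int × Int)) (capacity : Int), Dom_fill_the_sleigh toys capacity → Spec_fill_the_sleigh toys capacity (fill_the_sleigh toys capacity)

-- ===== LEMMAS AND PROOFS =====
theorem front_eq (capacity : Int) : ∀ (l : List (Int × Int)) (vol : Int) (acc : List Int),
    aFront capacity l vol acc = bFront capacity l vol acc := by
  intro l
  induction l with
  | nil => intro vol acc; rfl
  | cons p rest ih =>
      intro vol acc
      obtain ⟨idNum, volume⟩ := p
      simp only [aFront, bFront]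
      by_cases hc : vol + volume ≤ capacity
      · rw [if_pos hc, if_neg (by omega), ih]
      · rw [if_neg hc, if_pos (by omega)]

theorem back_eq (capacity : Int) : ∀ (l : List (Int × Int)) (vol : Int) (acc : List Int),
    aBack capacity l vol acc = bBack capacity l.reverse vol acc := by
  intro l
  induction l using List.reverseRecOn with
  | nil => intro vol acc; rw [aBack]; rfl
  | append_singleton l' x ih =>
      intro vol acc
      obtain ⟨idNum, volume⟩ := x
      rw [aBack]
      rw [dif_neg (by simp : l' ++ [(idNum, volume)] ≠ [])]
      simp only [List.getLast_concat, List.dropLast_concat, List.reverse_append,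
        List.reverse_cons, List.reverse_nil, List.nil_append, List.cons_append, bBack]
      by_cases hc : vol + volume ≤ capacity
      · rw [if_pos hc, if_neg (by omega), ih]
      · rw [if_neg hc, if_pos (by omega)]

-- ===== VERDICT (by name: the statement is the Claim_ definition above) =====
theorem fill_the_sleigh_spec : Claim_equal_fill_the_sleigh := by
  intro toys capacity _
  unfold Spec_fill_the_sleigh fill_the_sleigh fill_the_sleigh_alt
  rw [← front_eq]
  obtain ⟨vol, acc, rem⟩ := aFront capacity toys 0 []
  exact back_eq capacity rem vol acc
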